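-- pv_equiv track=rewrite | github.com/andrewgait/advent_of_code | adventofcode2017/advent3/advent3.py | part2
-- ===== SOURCE A (Python) =====
-- coords = [(1, 0), (1, -1), (0, -1), (-1, -1), (-1, 0), (-1, 1), (0, 1), (1, 1)]
--
-- def part2(input):
--     x = y = dx = 0
--     dy = -1
--     grid = {}
--
--     while True:
--         total = 0
--         for offset in coords:
--             ox, oy = offset
--             if (x+ox, y+oy) in grid:
--                 total += grid[(x+ox, y+oy)]
--         if total > int(input):
--             return total
--         if (x, y) == (0, 0):
--             grid[(0, 0)] = 1
--         else:
--             grid[(x, y)] = total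
--         if (x == y) or (x < 0 and x == -y) or (x > 0 and x == 1-y):
--             dx, dy = -dy, dx
--         x, y = x+dx, y+dy
-- ===== SOURCE B (Python) =====
-- def part2(input):
--     grid = {}
--     x = y = 0
--     dirs = [(1, 0), (0, 1), (-1, 0), (0, -1)]
--     seg = 0
--     while True:
--         dx, dy = dirs[seg % 4]
--         for _ in range(seg // 2 + 1):
--             total = sum(grid.get((x + ox, y + oy), 0)
--                         for ox in (-1, 0, 1) for oy in (-1, 0, 1)
--                         if (ox, oy) != (0, 0))
--             if total > int(input):
--                 return total
--             grid[(x, y)] = 1 if (x, y) == (0, 0) else total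
--             x, y = x + dx, y + dy
--         seg += 1
-- ===== Notes on version B (the rewrite author's own statement) =====
-- stated objective: alternative
-- what changed: Replaced A's coordinate-equation turn predicate and single step-by-step while loop with a run-length spiral generator: nested loops over segments whose lengths repeat each successive integer twice, rotating among four fixed directions after each segment, with the eight-neighbour sum taken from an offset comprehension via dict.get defaults instead of A's fixed offset list with membership tests.
import Mathlib
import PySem

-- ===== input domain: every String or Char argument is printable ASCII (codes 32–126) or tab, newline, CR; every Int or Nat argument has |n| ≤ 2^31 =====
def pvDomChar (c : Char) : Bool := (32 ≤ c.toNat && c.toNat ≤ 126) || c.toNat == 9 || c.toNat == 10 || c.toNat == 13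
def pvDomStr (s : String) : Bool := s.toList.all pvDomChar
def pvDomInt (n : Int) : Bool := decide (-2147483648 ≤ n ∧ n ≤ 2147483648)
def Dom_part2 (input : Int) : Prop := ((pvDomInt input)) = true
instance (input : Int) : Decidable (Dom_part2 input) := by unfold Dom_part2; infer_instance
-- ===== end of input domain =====

-- B replaces A's coordinate-based turn predicate with a run-length spiral generator
-- (segments of length 1,1,2,2,3,3,… with the direction rotated after each segment);
-- same grid and neighbour sums, a different decomposition of the walk.
-- Both ports carry a fuel bound of 156 visited cells; on the stated domain (|input| ≤ 2^31)
-- the 146th neighbour total already exceeds every admitted input, so the fuel is never exhausted.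

-- ===== PORT A =====
def coordsA : List (Int × Int) := [(1, 0), (1, -1), (0, -1), (-1, -1), (-1, 0), (-1, 1), (0, 1), (1, 1)]

def part2Loop (fuel : Nat) (x y dx dy : Int) (grid : PySem.Dict (Int × Int) Int) (input : Int) : Int :=
  match fuel with
  | 0 => 0
  | fuel + 1 =>
    let total := coordsA.foldl (fun total o =>
      match grid.get? (x + o.1, y + o.2) with
      | some v => total + v
      | none => total) 0
    if total > input then total
    else
      let grid := if (x, y) = ((0 : Int), (0 : Int)) then grid.insert (0, 0) 1 else grid.insert (x, y) total
      let d : Int × Int := if x = y ∨ (x < 0 ∧ x = -y) ∨ (x > 0 ∧ x = 1 - y) then (-dy, dx) else (dx, dy)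
      part2Loop fuel (x + d.1) (y + d.2) d.1 d.2 grid input

def part2 (input : Int) : Int := part2Loop 156 0 0 0 (-1) PySem.Dict.empty input

-- ===== PORT B =====
def dirsB : List (Int × Int) := [(1, 0), (0, 1), (-1, 0), (0, -1)]

def nbrTotal (grid : PySem.Dict (Int × Int) Int) (x y : Int) : Int :=
  (([-1, 0, 1] : List Int).flatMap (fun ox =>
    ([-1, 0, 1] : List Int).filterMap (fun oy =>
      if (ox, oy) = ((0 : Int), (0 : Int)) then none
      else some (grid.getD (x + ox, y + oy) 0)))).foldl (· + ·) 0

def segLoop (steps : Nat) (dx dy x y : Int) (grid : PySem.Dict (Int × Int) Int) (input : Int) :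
    Int ⊕ (Int × Int × PySem.Dict (Int × Int) Int) :=
  match steps with
  | 0 => Sum.inr (x, y, grid)
  | steps + 1 =>
    let total := nbrTotal grid x y
    if total > input then Sum.inl total
    else segLoop steps dx dy (x + dx) (y + dy)
      (grid.insert (x, y) (if (x, y) = ((0 : Int), (0 : Int)) then 1 else total)) input

def part2AltLoop (segfuel seg : Nat) (x y : Int) (grid : PySem.Dict (Int × Int) Int) (input : Int) : Int :=
  match segfuel with
  | 0 => 0
  | segfuel + 1 =>
    let d := dirsB.getD (seg % 4) (0, 0)
    match segLoop (seg / 2 + 1) d.1 d.2 x y grid input with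
    | Sum.inl t => t
    | Sum.inr st => part2AltLoop segfuel (seg + 1) st.1 st.2.1 st.2.2 input

def part2_alt (input : Int) : Int := part2AltLoop 24 0 0 0 PySem.Dict.empty input

-- ===== PRECONDITION & SPEC =====
def Spec_part2 (input : Int) (out : Int) : Prop := out = part2_alt input
instance (input : Int) (out : Int) : Decidable (Spec_part2 input out) := by unfold Spec_part2; infer_instance

-- ===== CLAIM (what is proved, stated in full; the proofs are below) =====
def Claim_equal_part2 : Prop := ∀ (input : Int), Dom_part2 input → Spec_part2 input (part2 input)

-- ===== LEMMAS AND PROOFS =====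

-- first element of the list exceeding input (0 if none): the shared return discipline of both loops
def pick (input : Int) : List Int → Int
  | [] => 0
  | t :: ts => if t > input then t else pick input ts

-- pick with an explicit continuation for the fuel-out case
def pickK (input : Int) (l : List Int) (k : Int) : Int :=
  match l with
  | [] => k
  | t :: ts => if t > input then t else pickK input ts k

-- the input-independent sequence of neighbour totals A's loop computes
def traceA (fuel : Nat) (x y dx dy : Int) (grid : PySem.Dict (Int × Int) Int) : List Int :=
  match fuel with
  | 0 => []
  | fuel + 1 =>
    let total := coordsA.foldl (fun total o =>
      match grid.get? (x + o.1, y + o.2) with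
      | some v => total + v
      | none => total) 0
    let grid' := if (x, y) = ((0 : Int), (0 : Int)) then grid.insert (0, 0) 1 else grid.insert (x, y) total
    let d : Int × Int := if x = y ∨ (x < 0 ∧ x = -y) ∨ (x > 0 ∧ x = 1 - y) then (-dy, dx) else (dx, dy)
    total :: traceA fuel (x + d.1) (y + d.2) d.1 d.2 grid'

-- one segment's totals and the state it leaves behind
def segTrace (steps : Nat) (dx dy x y : Int) (grid : PySem.Dict (Int × Int) Int) :
    List Int × (Int × Int × PySem.Dict (Int × Int) Int) :=
  match steps with
  | 0 => ([], (x, y, grid))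
  | steps + 1 =>
    let total := nbrTotal grid x y
    let r := segTrace steps dx dy (x + dx) (y + dy)
      (grid.insert (x, y) (if (x, y) = ((0 : Int), (0 : Int)) then 1 else total))
    (total :: r.1, r.2)

-- the input-independent sequence of neighbour totals B's loops compute
def traceB (segfuel seg : Nat) (x y : Int) (grid : PySem.Dict (Int × Int) Int) : List Int :=
  match segfuel with
  | 0 => []
  | segfuel + 1 =>
    let d := dirsB.getD (seg % 4) (0, 0)
    let r := segTrace (seg / 2 + 1) d.1 d.2 x y grid
    r.1 ++ traceB segfuel (seg + 1) r.2.1 r.2.2.1 r.2.2.2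

theorem pickK_append (input : Int) (l1 l2 : List Int) :
    pick input (l1 ++ l2) = pickK input l1 (pick input l2) := by
  induction l1 with
  | nil => rfl
  | cons t ts ih => simp only [List.cons_append, pick, pickK, ih]

theorem part2Loop_eq_pick (fuel : Nat) :
    ∀ (x y dx dy : Int) (grid : PySem.Dict (Int × Int) Int) (input : Int),
    part2Loop fuel x y dx dy grid input = pick input (traceA fuel x y dx dy grid) := by
  induction fuel with
  | zero => intros; rfl
  | succ fuel ih =>
    intro x y dx dy grid input
    simp only [part2Loop, traceA, pick]
    split
    · rfl
    · simp_all

theorem segLoop_eq (steps : Nat) :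
    ∀ (dx dy x y : Int) (grid : PySem.Dict (Int × Int) Int) (input : Int)
      (f : Int × Int × PySem.Dict (Int × Int) Int → Int),
    (match segLoop steps dx dy x y grid input with
     | Sum.inl t => t
     | Sum.inr st => f st) =
    pickK input (segTrace steps dx dy x y grid).1 (f (segTrace steps dx dy x y grid).2) := by
  induction steps with
  | zero => intros; rfl
  | succ steps ih =>
    intro dx dy x y grid input f
    simp only [segLoop, segTrace, pickK]
    by_cases h : nbrTotal grid x y > input
    · simp [h]
    · simp only [gt_iff_lt] at h
      simp [h, ih]

theorem part2AltLoop_eq_pick (segfuel : Nat) :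
    ∀ (seg : Nat) (x y : Int) (grid : PySem.Dict (Int × Int) Int) (input : Int),
    part2AltLoop segfuel seg x y grid input = pick input (traceB segfuel seg x y grid) := by
  induction segfuel with
  | zero => intros; rfl
  | succ segfuel ih =>
    intro seg x y grid input
    simp only [part2AltLoop, traceB, pickK_append]
    rw [segLoop_eq]
    simp only [ih]

set_option maxRecDepth 100000 in
set_option maxHeartbeats 2000000 in
theorem traces_agree :
    traceA 156 0 0 0 (-1) PySem.Dict.empty = traceB 24 0 0 0 PySem.Dict.empty := by
  decide

-- ===== VERDICT (by name: the statement is the Claim_ definition above) =====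
theorem part2_spec : Claim_equal_part2 := by
  intro input _
  show part2 input = part2_alt input
  unfold part2 part2_alt
  rw [part2Loop_eq_pick, part2AltLoop_eq_pick, traces_agree]
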